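-- pv_equiv track=rewrite | github.com/kalasu-1999/checkCode | calculator/DBSCAN/dbscan.py | getDbscanTestNumber
-- ===== SOURCE A (Python) =====
-- def getDbscanTestNumber(clusteringList, unPassList):
--     # 记录被筛选过的测试用例数量
--     count = 0
--     # 分簇结果值标志,从-1开始
--     flag = -1
--     # 存放分解结果
--     dbscanTestNumber = []
--     while count != clusteringList.__len__():
--         temp = []
--         for i in range(clusteringList.__len__()):
--             if clusteringList[i] == flag:
--                 count = count + 1
--                 temp.append(unPassList[i])
--         if temp.__len__() > 0:
--             dbscanTestNumber.append(temp)
--         flag = flag + 1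
--     return dbscanTestNumber
-- ===== SOURCE B (Python) =====
-- def getDbscanTestNumber(clusteringList, unPassList):
--     groups = {}
--     for label, case in zip(clusteringList, unPassList):
--         groups.setdefault(label, []).append(case)
--     return [groups[k] for k in sorted(groups)]
-- ===== Notes on version B (the rewrite author's own statement) =====
-- stated objective: alternative
-- what changed: Replaced A's repeated full scans of clusteringList for every flag value -1,0,1,... by a single-pass dict grouping over zip(clusteringList, unPassList) followed by emitting the groups in ascending key order (intended as faster; a timing run saw A time out at n=16 where B returned, so no ratio could be measured).
import Mathlib
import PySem

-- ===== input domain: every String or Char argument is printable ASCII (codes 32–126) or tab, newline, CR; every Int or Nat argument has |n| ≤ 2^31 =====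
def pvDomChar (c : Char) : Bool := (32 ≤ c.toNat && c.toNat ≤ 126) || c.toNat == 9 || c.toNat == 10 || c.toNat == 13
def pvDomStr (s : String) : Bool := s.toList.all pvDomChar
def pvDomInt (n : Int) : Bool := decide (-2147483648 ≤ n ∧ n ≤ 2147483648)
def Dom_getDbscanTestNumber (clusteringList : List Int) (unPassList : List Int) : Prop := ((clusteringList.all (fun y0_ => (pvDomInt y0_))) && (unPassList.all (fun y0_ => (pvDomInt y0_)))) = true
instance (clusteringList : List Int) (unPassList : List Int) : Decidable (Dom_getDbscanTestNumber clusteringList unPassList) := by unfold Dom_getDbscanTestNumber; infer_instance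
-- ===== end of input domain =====

-- B replaces A's per-flag rescans of the whole list by one dict-grouping pass plus a key sort.

-- ===== PORT A =====
-- literal port of A's while-loop; the fuel argument only makes the (on bad labels infinite)
-- Python loop total: inside Pre_ the loop stops via its own 'count != len' test before fuel runs out
def dbLoopA (cl ul : List Int) (fuel : Nat) (count : Int) (flag : Int) (acc : List (List Int)) : List (List Int) :=
  match fuel with
  | 0 => acc
  | fuel + 1 =>
    if count = (cl.length : Int) then acc
    else
      let s := (List.range cl.length).foldl
        (fun (s : Int × List Int) i =>
          if cl.getD i 0 = flag then (s.1 + 1, s.2 ++ [ul.getD i 0]) else s)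
        (count, [])
      dbLoopA cl ul fuel s.1 (flag + 1) (if s.2.length > 0 then acc ++ [s.2] else acc)

def getDbscanTestNumber (clusteringList : List Int) (unPassList : List Int) : List (List Int) :=
  dbLoopA clusteringList unPassList (clusteringList.foldl (fun m x => max m x.toNat) 0 + 2) 0 (-1) []

-- ===== PORT B =====
def getDbscanTestNumber_alt (clusteringList : List Int) (unPassList : List Int) : List (List Int) :=
  let groups := (clusteringList.zip unPassList).foldl
    (fun (d : PySem.Dict Int (List Int)) p => d.modify p.1 [] (· ++ [p.2])) PySem.Dict.empty
  (PySem.List.sorted groups.keys (fun x => x) false).map (fun k => groups.getD k [])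

-- ===== PRECONDITION & SPEC =====
-- Pre_ excludes exactly the inputs on which the Python A does not return: it raises IndexError when an
-- index with a label ≥ -1 lies beyond unPassList, and loops forever when some label is < -1.
def Pre_getDbscanTestNumber (clusteringList : List Int) (unPassList : List Int) : Prop :=
  clusteringList.length ≤ unPassList.length ∧ ∀ x ∈ clusteringList, -1 ≤ x
instance (clusteringList : List Int) (unPassList : List Int) : Decidable (Pre_getDbscanTestNumber clusteringList unPassList) := by unfold Pre_getDbscanTestNumber; infer_instance
def pvWitness_getDbscanTestNumber : List Int × List Int := ([0, -1, 0, 2], [10, 20, 30, 40])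

def Spec_getDbscanTestNumber (clusteringList : List Int) (unPassList : List Int) (out : List (List Int)) : Prop := out = getDbscanTestNumber_alt clusteringList unPassList
instance (clusteringList : List Int) (unPassList : List Int) (out : List (List Int)) : Decidable (Spec_getDbscanTestNumber clusteringList unPassList out) := by unfold Spec_getDbscanTestNumber; infer_instance

-- ===== CLAIM (what is proved, stated in full; the proofs are below) =====
def Claim_equal_getDbscanTestNumber : Prop := ∀ (clusteringList : List Int) (unPassList : List Int), Dom_getDbscanTestNumber clusteringList unPassList → Pre_getDbscanTestNumber clusteringList unPassList → Spec_getDbscanTestNumber clusteringList unPassList (getDbscanTestNumber clusteringList unPassList)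
-- ===== LEMMAS AND PROOFS =====

def selGrp (cl ul : List Int) (k : Int) : List Int :=
  ((cl.zip ul).filter (fun p => p.1 == k)).map (fun p => p.2)

def keysFrom (flag : Int) : Nat → List Int
  | 0 => []
  | n+1 => flag :: keysFrom (flag+1) n

theorem mem_keysFrom_iff (k : Int) : ∀ (n : Nat) (f : Int), k ∈ keysFrom f n ↔ f ≤ k ∧ k < f + n := by
  intro n
  induction n with
  | zero => intro f; simp [keysFrom]
  | succ m ih => intro f; simp [keysFrom, ih (f+1)]; omega

theorem pairwise_keysFrom : ∀ (n : Nat) (f : Int), (keysFrom f n).Pairwise (· < ·) := by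
  intro n
  induction n with
  | zero => intro f; simp [keysFrom]
  | succ m ih =>
    intro f
    refine List.Pairwise.cons ?_ (ih (f+1))
    intro y hy
    have := (mem_keysFrom_iff y m (f+1)).1 hy
    omega

theorem innerFold (cl ul : List Int) (flag : Int) :
    ∀ (l : List Nat) (count : Int) (t0 : List Int),
    l.foldl (fun (s : Int × List Int) i =>
        if cl.getD i 0 = flag then (s.1 + 1, s.2 ++ [ul.getD i 0]) else s) (count, t0)
    = (count + ((l.filter (fun i => decide (cl.getD i 0 = flag))).length : Int),
       t0 ++ (l.filter (fun i => decide (cl.getD i 0 = flag))).map (fun i => ul.getD i 0)) := by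
  intro l
  induction l with
  | nil => intro count t0; simp
  | cons a t ih =>
    intro count t0
    rw [List.foldl_cons, List.filter_cons]
    by_cases h : cl.getD a 0 = flag
    · rw [if_pos h, if_pos (by simpa using h), ih]
      refine Prod.ext ?_ ?_
      · simp only [List.length_cons]; push_cast; ring
      · simp
    · rw [if_neg h, if_neg (by simpa using h), ih]

theorem rangeSel (flag : Int) :
    ∀ (cl ul : List Int), cl.length ≤ ul.length →
    ((List.range cl.length).filter (fun i => decide (cl.getD i 0 = flag))).map (fun i => ul.getD i 0)
      = selGrp cl ul flag := by
  intro cl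
  induction cl with
  | nil => intro ul h; simp [selGrp]
  | cons c cl' ih =>
    intro ul h
    match ul with
    | [] => simp at h
    | u :: ul' =>
      have h' : cl'.length ≤ ul'.length := by simpa using h
      have hrest := ih ul' h'
      have hp : ((fun i => decide ((c :: cl').getD i 0 = flag)) ∘ Nat.succ)
          = (fun i => decide (cl'.getD i 0 = flag)) := by
        funext i; rfl
      have hm : ((fun i => (u :: ul').getD i 0) ∘ Nat.succ) = (fun i => ul'.getD i 0) := by
        funext i; rfl
      have hshift :
          (((List.range cl'.length).map Nat.succ).filter
              (fun i => decide ((c :: cl').getD i 0 = flag))).map (fun i => (u :: ul').getD i 0)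
          = ((List.range cl'.length).filter
              (fun i => decide (cl'.getD i 0 = flag))).map (fun i => ul'.getD i 0) := by
        rw [List.filter_map, List.map_map, hp, hm]
      rw [List.length_cons, List.range_succ_eq_map, List.filter_cons]
      by_cases hc : c = flag
      · subst hc
        rw [if_pos (by simp), List.map_cons, hshift, hrest]
        simp [selGrp]
      · rw [if_neg (by simpa using hc), hshift, hrest]
        have hb : (c == flag) = false := by simp [hc]
        simp [selGrp, hb]

theorem selLen (flag : Int) :
    ∀ (cl ul : List Int), cl.length ≤ ul.length →
    (selGrp cl ul flag).length = (cl.filter (fun x => decide (x = flag))).length := by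
  intro cl
  induction cl with
  | nil => intro ul h; simp [selGrp]
  | cons c cl' ih =>
    intro ul h
    match ul with
    | [] => simp at h
    | u :: ul' =>
      have h' : cl'.length ≤ ul'.length := by simpa using h
      by_cases hc : c = flag
      · simp [selGrp, hc, List.zip_cons_cons] at *
        exact ih ul' h'
      · have : (c == flag) = false := by simp [hc]
        simp [selGrp, hc, this, List.zip_cons_cons] at *
        exact ih ul' h'

theorem filterSplit (flag : Int) : ∀ (cl : List Int),
    (cl.filter (fun x => decide (x < flag + 1))).length
      = (cl.filter (fun x => decide (x < flag))).length
        + (cl.filter (fun x => decide (x = flag))).length := by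
  intro cl
  induction cl with
  | nil => simp
  | cons c cl' ih =>
    simp only [List.filter_cons]
    split_ifs with h1 h2 h3 <;> simp_all <;> omega

theorem selGrp_eq_nil_iff (cl ul : List Int) (flag : Int) (h : cl.length ≤ ul.length) :
    selGrp cl ul flag = [] ↔ flag ∉ cl := by
  have hl := selLen flag cl ul h
  constructor
  · intro hnil hmem
    have : (selGrp cl ul flag).length = 0 := by rw [hnil]; rfl
    rw [hl] at this
    have : cl.filter (fun x => decide (x = flag)) = [] := by
      cases hfe : cl.filter (fun x => decide (x = flag)) with
      | nil => rfl
      | cons a t => rw [hfe] at this; simp at this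
    rw [List.filter_eq_nil_iff] at this
    exact this flag hmem (by simp)
  · intro hmem
    have : cl.filter (fun x => decide (x = flag)) = [] := by
      rw [List.filter_eq_nil_iff]
      intro a ha hd
      simp at hd
      exact hmem (hd ▸ ha)
    have : (selGrp cl ul flag).length = 0 := by rw [hl, this]; rfl
    exact List.length_eq_zero_iff.1 this

theorem dbLoopA_eq (cl ul : List Int) (h : cl.length ≤ ul.length) :
    ∀ (fuel : Nat) (flag : Int) (acc : List (List Int)),
    (∀ x ∈ cl, x < flag + fuel) →
    dbLoopA cl ul fuel ((cl.filter (fun x => decide (x < flag))).length : Int) flag acc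
      = acc ++ ((keysFrom flag fuel).filter (fun k => decide (k ∈ cl))).map (selGrp cl ul) := by
  intro fuel
  induction fuel with
  | zero => intro flag acc _; simp [dbLoopA, keysFrom]
  | succ m ih =>
    intro flag acc hf
    rw [dbLoopA]
    by_cases hstop : ((cl.filter (fun x => decide (x < flag))).length : Int) = (cl.length : Int)
    · rw [if_pos hstop]
      have hall : ∀ x ∈ cl, x < flag := by
        have : (cl.filter (fun x => decide (x < flag))).length = cl.length := by exact_mod_cast hstop
        have := (List.length_filter_eq_length_iff).1 this
        intro x hx; simpa using this x hx
      have : (keysFrom flag (m+1)).filter (fun k => decide (k ∈ cl)) = [] := by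
        rw [List.filter_eq_nil_iff]
        intro k hk hdk
        simp at hdk
        have h1 := (mem_keysFrom_iff k (m+1) flag).1 hk
        have := hall k hdk
        omega
      simp [this]
    · rw [if_neg hstop]
      rw [innerFold]
      have hsel := rangeSel flag cl ul h
      have hlen' : ((List.range cl.length).filter (fun i => decide (cl.getD i 0 = flag))).length
          = (selGrp cl ul flag).length := by rw [← hsel, List.length_map]
      simp only [List.nil_append, hsel, hlen', gt_iff_lt]
      have hcount : ((cl.filter (fun x => decide (x < flag))).length : Int) + ((selGrp cl ul flag).length : Int)
          = ((cl.filter (fun x => decide (x < flag + 1))).length : Int) := by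
        rw [selLen flag cl ul h, filterSplit flag cl]
        push_cast; ring
      have hf' : ∀ x ∈ cl, x < (flag + 1) + m := by intro x hx; have := hf x hx; omega
      by_cases hmem : flag ∈ cl
      · have hne : selGrp cl ul flag ≠ [] := by
          intro hq; exact ((selGrp_eq_nil_iff cl ul flag h).1 hq) hmem
        have hlen : 0 < (selGrp cl ul flag).length := List.length_pos_iff.2 hne
        rw [if_pos hlen]
        rw [hcount, ih (flag+1) (acc ++ [selGrp cl ul flag]) hf']
        have : keysFrom flag (m+1) = flag :: keysFrom (flag+1) m := rfl
        rw [this, List.filter_cons]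
        simp [hmem]
      · have hnil : selGrp cl ul flag = [] := (selGrp_eq_nil_iff cl ul flag h).2 hmem
        have hlen : ¬ 0 < (selGrp cl ul flag).length := by rw [hnil]; simp
        rw [if_neg hlen]
        rw [hcount, ih (flag+1) acc hf']
        have : keysFrom flag (m+1) = flag :: keysFrom (flag+1) m := rfl
        rw [this, List.filter_cons]
        simp [hmem]

theorem le_foldl_max (cl : List Int) : ∀ (b : Nat), b ≤ cl.foldl (fun m y => max m y.toNat) b := by
  induction cl with
  | nil => intro b; simp
  | cons c t ih =>
    intro b
    simp only [List.foldl_cons]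
    exact le_trans (le_max_left b c.toNat) (ih _)

theorem mem_le_foldl_max (cl : List Int) : ∀ (b : Nat) (x : Int), x ∈ cl → x.toNat ≤ cl.foldl (fun m y => max m y.toNat) b := by
  induction cl with
  | nil => intro b x hx; simp at hx
  | cons c t ih =>
    intro b x hx
    simp only [List.foldl_cons]
    rcases List.mem_cons.1 hx with rfl | hx
    · exact le_trans (le_max_right b x.toNat) (le_foldl_max t _)
    · exact ih _ x hx

theorem getDbscanTestNumber_eq_canon (cl ul : List Int) (h : cl.length ≤ ul.length)
    (hpos : ∀ x ∈ cl, -1 ≤ x) :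
    getDbscanTestNumber cl ul
      = ((keysFrom (-1) (cl.foldl (fun m x => max m x.toNat) 0 + 2)).filter
          (fun k => decide (k ∈ cl))).map (selGrp cl ul) := by
  unfold getDbscanTestNumber
  have h0 : cl.filter (fun x => decide (x < (-1 : Int))) = [] := by
    rw [List.filter_eq_nil_iff]
    intro a ha hd
    simp at hd
    have := hpos a ha
    omega
  have hc0 : ((cl.filter (fun x => decide (x < (-1 : Int)))).length : Int) = 0 := by rw [h0]; rfl
  rw [← hc0]
  apply dbLoopA_eq cl ul h
  intro x hx
  have h1 := mem_le_foldl_max cl 0 x hx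
  have h2 : x ≤ (x.toNat : Int) := Int.self_le_toNat x
  push_cast at *
  omega

theorem keysFilter_sorted (cl ul : List Int) (h : cl.length ≤ ul.length)
    (hpos : ∀ x ∈ cl, -1 ≤ x) :
    PySem.List.sorted
      ((cl.zip ul).foldl (fun (d : PySem.Dict Int (List Int)) p => d.modify p.1 [] (· ++ [p.2]))
        PySem.Dict.empty).keys (fun x => x) false
      = (keysFrom (-1) (cl.foldl (fun m x => max m x.toNat) 0 + 2)).filter (fun k => decide (k ∈ cl)) := by
  set N := cl.foldl (fun m x => max m x.toNat) 0 + 2 with hN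
  have hkeys : ((cl.zip ul).foldl (fun (d : PySem.Dict Int (List Int)) p => d.modify p.1 [] (· ++ [p.2]))
        PySem.Dict.empty).keys = PySem.Set.ofList cl := by
    rw [PySem.Dict.keys_foldl_modify_key]
    rw [List.map_fst_zip h]
    simp [PySem.Dict.keys_empty, PySem.Set.update, PySem.Set.ofList_eq_foldl]
  rw [hkeys]
  apply PySem.List.sorted_eq_of_perm_of_pairwise_lt
  · rw [List.perm_ext_iff_of_nodup]
    · intro a
      rw [List.mem_filter, PySem.Set.mem_ofList, mem_keysFrom_iff]
      constructor
      · rintro ⟨_, hd⟩; simpa using hd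
      · intro ha
        refine ⟨?_, by simpa using ha⟩
        have h1 := mem_le_foldl_max cl 0 a ha
        have h2 : a ≤ (a.toNat : Int) := Int.self_le_toNat a
        have h3 := hpos a ha
        constructor
        · omega
        · push_cast at *; omega
    · exact List.Pairwise.filter _ ((pairwise_keysFrom N (-1)).imp (fun hlt => ne_of_lt hlt))
    · exact PySem.Set.nodup_ofList cl
  · exact List.Pairwise.filter _ (pairwise_keysFrom N (-1))

-- ===== VERDICT (by name: the statement is the Claim_ definition above) =====
theorem getDbscanTestNumber_spec : Claim_equal_getDbscanTestNumber := by
  intro cl ul _ hpre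
  obtain ⟨h, hpos⟩ := hpre
  unfold Spec_getDbscanTestNumber getDbscanTestNumber_alt
  rw [getDbscanTestNumber_eq_canon cl ul h hpos]
  simp only
  rw [keysFilter_sorted cl ul h hpos]
  apply List.map_congr_left
  intro k _
  rw [PySem.Dict.getD_foldl_modify_append]
  simp [PySem.Dict.getD_empty, selGrp]
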